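-- pv_equiv track=rewrite | github.com/Soflutionltd/aura | orchestrator/federated_server.py | classify_trajectory
-- ===== SOURCE A (Python) =====
-- def classify_trajectory(traj: dict) -> str:
--     """Classify trajectory by dominant task type for expert routing."""
--     tools_used = [s.get("tool", "") for s in traj.get("steps", [])]
--     if "code_execution" in tools_used or "terminal_cmd" in tools_used:
--         return "coding"
--     elif "web_search" in tools_used:
--         return "research"
--     elif "local_rag" in tools_used:
--         return "analysis"
--     elif "file_system" in tools_used:
--         return "file_ops"
--     return "general"
-- ===== SOURCE B (Python) =====
-- _RANK = {
--     "code_execution": (0, "coding"),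
--     "terminal_cmd": (0, "coding"),
--     "web_search": (1, "research"),
--     "local_rag": (2, "analysis"),
--     "file_system": (3, "file_ops"),
-- }
--
-- def classify_trajectory(traj: dict) -> str:
--     """Classify trajectory by dominant task type for expert routing."""
--     best_rank, best_label = 4, "general"
--     for s in traj.get("steps", []):
--         r = _RANK.get(s.get("tool", ""))
--         if r is not None and r[0] < best_rank:
--             best_rank, best_label = r
--     return best_label
-- ===== Notes on version B (the rewrite author's own statement) =====
-- stated objective: alternative
-- what changed: Replaces the four repeated membership scans over the extracted tool list by a single pass over the steps that looks each tool up in a priority map and keeps a running minimum rank/label, returning 'general' when nothing matched.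
import Mathlib
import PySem

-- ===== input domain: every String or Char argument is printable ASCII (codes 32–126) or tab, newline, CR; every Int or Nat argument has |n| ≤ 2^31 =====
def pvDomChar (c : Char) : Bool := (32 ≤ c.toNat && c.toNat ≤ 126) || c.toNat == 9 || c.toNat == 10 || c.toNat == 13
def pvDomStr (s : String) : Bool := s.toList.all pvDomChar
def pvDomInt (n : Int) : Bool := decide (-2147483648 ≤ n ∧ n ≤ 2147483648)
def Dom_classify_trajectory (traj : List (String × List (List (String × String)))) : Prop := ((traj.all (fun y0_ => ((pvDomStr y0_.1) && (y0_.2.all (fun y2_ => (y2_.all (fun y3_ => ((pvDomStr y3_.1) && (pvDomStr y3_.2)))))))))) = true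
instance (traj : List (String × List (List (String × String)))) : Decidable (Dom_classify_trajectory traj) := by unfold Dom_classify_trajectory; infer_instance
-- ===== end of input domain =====

-- B replaces A's four repeated membership scans over the tool list by one pass over the
-- steps keeping a running minimum (priority, label); same return value, alternative algorithm.

-- ===== PORT A =====
def classify_trajectory (traj : List (String × List (List (String × String)))) : String :=
  let tools_used := (PySem.Dict.getD (PySem.Dict.mk traj) "steps" []).map
      (fun s => PySem.Dict.getD (PySem.Dict.mk s) "tool" "")
  if tools_used.contains "code_execution" || tools_used.contains "terminal_cmd" then "coding"
  else if tools_used.contains "web_search" then "research"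
  else if tools_used.contains "local_rag" then "analysis"
  else if tools_used.contains "file_system" then "file_ops"
  else "general"

-- ===== PORT B =====
-- the module-level _RANK dict of Source B
def pvRankDict : PySem.Dict String (Nat × String) :=
  PySem.Dict.mk [("code_execution", (0, "coding")), ("terminal_cmd", (0, "coding")),
                 ("web_search", (1, "research")), ("local_rag", (2, "analysis")),
                 ("file_system", (3, "file_ops"))]

def classify_trajectory_alt (traj : List (String × List (List (String × String)))) : String :=
  let steps := PySem.Dict.getD (PySem.Dict.mk traj) "steps" []
  (steps.foldl (fun (acc : Nat × String) s =>
      match pvRankDict.get? (PySem.Dict.getD (PySem.Dict.mk s) "tool" "") with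
      | some r => if r.1 < acc.1 then r else acc
      | none => acc) (4, "general")).2

-- ===== PRECONDITION & SPEC =====
def Spec_classify_trajectory (traj : List (String × List (List (String × String)))) (out : String) : Prop := out = classify_trajectory_alt traj
instance (traj : List (String × List (List (String × String)))) (out : String) : Decidable (Spec_classify_trajectory traj out) := by unfold Spec_classify_trajectory; infer_instance

-- ===== CLAIM (what is proved, stated in full; the proofs are below) =====
def Claim_equal_classify_trajectory : Prop := ∀ (traj : List (String × List (List (String × String)))), Dom_classify_trajectory traj → Spec_classify_trajectory traj (classify_trajectory traj)

-- ===== LEMMAS AND PROOFS =====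

-- rank of a tool name (4 = no category), and the label a final rank denotes
def pvRv (t : String) : Nat :=
  match pvRankDict.get? t with | some r => r.1 | none => 4
def pvL (r : Nat) : String :=
  if r = 0 then "coding" else if r = 1 then "research" else if r = 2 then "analysis"
  else if r = 3 then "file_ops" else "general"
-- minimum rank over a tool list
def pvN (ts : List String) : Nat := ts.foldr (fun t b => min (pvRv t) b) 4

lemma pvRank_eq (t : String) : pvRankDict.get? t =
    if "code_execution" = t then some (0, "coding")
    else if "terminal_cmd" = t then some (0, "coding")
    else if "web_search" = t then some (1, "research")
    else if "local_rag" = t then some (2, "analysis")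
    else if "file_system" = t then some (3, "file_ops")
    else none := by
  simp only [pvRankDict, PySem.Dict.get?_mk_cons, beq_iff_eq]
  split_ifs <;> rfl

lemma pvRv_le (t : String) : pvRv t ≤ 4 := by
  unfold pvRv; rw [pvRank_eq]; split_ifs <;> simp

lemma pvStep_eq (t : String) (a : Nat) (ha : a ≤ 4) :
    (match pvRankDict.get? t with
      | some r => if r.1 < a then r else (a, pvL a)
      | none => (a, pvL a)) =
    (min (pvRv t) a, pvL (min (pvRv t) a)) := by
  unfold pvRv; rw [pvRank_eq]; interval_cases a <;> split_ifs <;> rfl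

lemma pvFold_eq (ss : List (List (String × String))) : ∀ (a : Nat), a ≤ 4 →
    (ss.foldl (fun (acc : Nat × String) s =>
      match pvRankDict.get? (PySem.Dict.getD (PySem.Dict.mk s) "tool" "") with
      | some r => if r.1 < acc.1 then r else acc
      | none => acc) (a, pvL a))
    = (min a (pvN (ss.map (fun s => PySem.Dict.getD (PySem.Dict.mk s) "tool" ""))),
       pvL (min a (pvN (ss.map (fun s => PySem.Dict.getD (PySem.Dict.mk s) "tool" ""))))) := by
  induction ss with
  | nil => intro a ha; simp [pvN, Nat.min_eq_left ha]
  | cons s ss ih =>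
    intro a ha
    simp only [List.foldl_cons, List.map_cons, pvN, List.foldr_cons]
    rw [pvStep_eq _ a ha]
    have hrv := pvRv_le (PySem.Dict.getD (PySem.Dict.mk s) "tool" "")
    rw [ih _ (by omega)]
    have heq : min (min (pvRv (PySem.Dict.getD (PySem.Dict.mk s) "tool" "")) a)
        (pvN (ss.map (fun s => PySem.Dict.getD (PySem.Dict.mk s) "tool" "")))
        = min a (min (pvRv (PySem.Dict.getD (PySem.Dict.mk s) "tool" ""))
        (pvN (ss.map (fun s => PySem.Dict.getD (PySem.Dict.mk s) "tool" "")))) := by omega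
    simp only [pvN] at heq ⊢
    rw [heq]

-- characterization of the minimum rank by membership
lemma pvN_char (ts : List String) :
    (pvN ts = 0 ↔ ("code_execution" ∈ ts ∨ "terminal_cmd" ∈ ts)) ∧
    (pvN ts ≤ 1 ↔ ("code_execution" ∈ ts ∨ "terminal_cmd" ∈ ts ∨ "web_search" ∈ ts)) ∧
    (pvN ts ≤ 2 ↔ ("code_execution" ∈ ts ∨ "terminal_cmd" ∈ ts ∨ "web_search" ∈ ts ∨ "local_rag" ∈ ts)) ∧
    (pvN ts ≤ 3 ↔ ("code_execution" ∈ ts ∨ "terminal_cmd" ∈ ts ∨ "web_search" ∈ ts ∨ "local_rag" ∈ ts ∨ "file_system" ∈ ts)) ∧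
    pvN ts ≤ 4 := by
  induction ts with
  | nil => simp [pvN]
  | cons t ts ih =>
    obtain ⟨i0, i1, i2, i3, i4⟩ := ih
    have hN : pvN (t :: ts) = min (pvRv t) (pvN ts) := rfl
    have hrv : pvRv t =
        if "code_execution" = t then 0 else if "terminal_cmd" = t then 0
        else if "web_search" = t then 1 else if "local_rag" = t then 2
        else if "file_system" = t then 3 else 4 := by
      unfold pvRv; rw [pvRank_eq]; split_ifs <;> rfl
    simp only [List.mem_cons, hN]
    split_ifs at hrv with h1 h2 h3 h4 h5
    · subst h1
      refine ⟨?_, ?_, ?_, ?_, ?_⟩ <;> simp [hrv, ← i0, ← i1, ← i2, ← i3] <;> omega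
    · subst h2
      refine ⟨?_, ?_, ?_, ?_, ?_⟩ <;> simp [hrv, ← i0, ← i1, ← i2, ← i3] <;> omega
    · subst h3
      refine ⟨?_, ?_, ?_, ?_, ?_⟩ <;> simp [hrv, ← i0, ← i1, ← i2, ← i3] <;> omega
    · subst h4
      refine ⟨?_, ?_, ?_, ?_, ?_⟩ <;> simp [hrv, ← i0, ← i1, ← i2, ← i3] <;> omega
    · subst h5
      refine ⟨?_, ?_, ?_, ?_, ?_⟩ <;> simp [hrv, ← i0, ← i1, ← i2, ← i3] <;> omega
    · refine ⟨?_, ?_, ?_, ?_, ?_⟩ <;>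
        simp [hrv, h1, h2, h3, h4, h5, ← i0, ← i1, ← i2, ← i3] <;> omega

-- ===== VERDICT (by name: the statement is the Claim_ definition above) =====
set_option maxHeartbeats 1000000 in
theorem classify_trajectory_spec : Claim_equal_classify_trajectory := by
  intro traj _
  unfold Spec_classify_trajectory
  simp only [classify_trajectory, classify_trajectory_alt]
  set ss := PySem.Dict.getD (PySem.Dict.mk traj) "steps" [] with hss
  set ts := ss.map (fun s => PySem.Dict.getD (PySem.Dict.mk s) "tool" "") with hts
  have hfold := pvFold_eq ss 4 (le_refl 4)
  have h4 : pvL 4 = "general" := rfl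
  rw [h4] at hfold
  rw [← hts] at hfold
  obtain ⟨c0, c1, c2, c3, c4⟩ := pvN_char ts
  have hmin : min 4 (pvN ts) = pvN ts := by omega
  rw [hmin] at hfold
  rw [hfold]
  by_cases h0 : "code_execution" ∈ ts ∨ "terminal_cmd" ∈ ts
  · have hb0 : (ts.contains "code_execution" || ts.contains "terminal_cmd") = true := by
      simp only [Bool.or_eq_true, List.contains_iff_mem]; exact h0
    rw [if_pos hb0]
    have h : pvN ts = 0 := c0.mpr h0
    simp [pvL, h]
  · have hb0 : ¬ ((ts.contains "code_execution" || ts.contains "terminal_cmd") = true) := by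
      simp only [Bool.or_eq_true, List.contains_iff_mem]; exact h0
    rw [if_neg hb0]
    by_cases h1 : "web_search" ∈ ts
    · have hb1 : ts.contains "web_search" = true := by
        simp only [List.contains_iff_mem]; exact h1
      rw [if_pos hb1]
      have hle : pvN ts ≤ 1 := c1.mpr (Or.inr (Or.inr h1))
      have hne : pvN ts ≠ 0 := fun hh => (c0.mp hh).elim (fun a => h0 (Or.inl a)) (fun b => h0 (Or.inr b))
      have h : pvN ts = 1 := by omega
      simp [pvL, h]
    · have hb1 : ¬ (ts.contains "web_search" = true) := by
        simp only [List.contains_iff_mem]; exact h1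
      rw [if_neg hb1]
      by_cases h2 : "local_rag" ∈ ts
      · have hb2 : ts.contains "local_rag" = true := by
          simp only [List.contains_iff_mem]; exact h2
        rw [if_pos hb2]
        have hle : pvN ts ≤ 2 := c2.mpr (Or.inr (Or.inr (Or.inr h2)))
        have hn1 : ¬ pvN ts ≤ 1 := fun hh => (c1.mp hh).elim (fun a => h0 (Or.inl a))
          (fun r => r.elim (fun b => h0 (Or.inr b)) h1)
        have h : pvN ts = 2 := by omega
        simp [pvL, h]
      · have hb2 : ¬ (ts.contains "local_rag" = true) := by
          simp only [List.contains_iff_mem]; exact h2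
        rw [if_neg hb2]
        by_cases h3 : "file_system" ∈ ts
        · have hb3 : ts.contains "file_system" = true := by
            simp only [List.contains_iff_mem]; exact h3
          rw [if_pos hb3]
          have hle : pvN ts ≤ 3 := c3.mpr (Or.inr (Or.inr (Or.inr (Or.inr h3))))
          have hn2 : ¬ pvN ts ≤ 2 := fun hh => (c2.mp hh).elim (fun a => h0 (Or.inl a))
            (fun r => r.elim (fun b => h0 (Or.inr b)) (fun r => r.elim h1 h2))
          have h : pvN ts = 3 := by omega
          simp [pvL, h]
        · have hb3 : ¬ (ts.contains "file_system" = true) := by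
            simp only [List.contains_iff_mem]; exact h3
          rw [if_neg hb3]
          have hn3 : ¬ pvN ts ≤ 3 := fun hh => (c3.mp hh).elim (fun a => h0 (Or.inl a))
            (fun r => r.elim (fun b => h0 (Or.inr b)) (fun r => r.elim h1 (fun r => r.elim h2 h3)))
          have h : pvN ts = 4 := by omega
          simp [pvL, h]
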